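-- pv_equiv track=rewrite | github.com/Sele3/Advent-of-Code-2023 | day13/solver.py | convert_grid_to_nums
-- ===== SOURCE A (Python) =====
-- from typing import List
--
-- SYMBOLS = {
--     ".": 0,
--     "#": 1,
-- }
--
-- def convert_grid_to_nums(grid: List[str]) -> List[int]:
--     """
--     Convert the list of strings to a list of numbers
--     """
--     result = []
--     for row in grid:
--         row_num = 0
--         for symbol in row:
--             row_num = (row_num << 1) | SYMBOLS[symbol]
--         result.append(row_num)
--
--     return result
-- ===== SOURCE B (Python) =====
-- from typing import List
--
-- SYMBOLS = {
--     ".": 0,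
--     "#": 1,
-- }
--
-- def convert_grid_to_nums(grid: List[str]) -> List[int]:
--     """
--     Convert the list of strings to a list of numbers
--     """
--     return [
--         int(bits, 2) if bits else 0
--         for bits in ("".join(str(SYMBOLS[c]) for c in row) for row in grid)
--     ]
-- ===== Notes on version B (the rewrite author's own statement) =====
-- stated objective: idiomatic
-- what changed: Replaces the explicit accumulator loop (shift/OR per bit, append per row) with a comprehension that maps each row to a binary digit string and delegates the base-2 interpretation to int(bits, 2).
import Mathlib
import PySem

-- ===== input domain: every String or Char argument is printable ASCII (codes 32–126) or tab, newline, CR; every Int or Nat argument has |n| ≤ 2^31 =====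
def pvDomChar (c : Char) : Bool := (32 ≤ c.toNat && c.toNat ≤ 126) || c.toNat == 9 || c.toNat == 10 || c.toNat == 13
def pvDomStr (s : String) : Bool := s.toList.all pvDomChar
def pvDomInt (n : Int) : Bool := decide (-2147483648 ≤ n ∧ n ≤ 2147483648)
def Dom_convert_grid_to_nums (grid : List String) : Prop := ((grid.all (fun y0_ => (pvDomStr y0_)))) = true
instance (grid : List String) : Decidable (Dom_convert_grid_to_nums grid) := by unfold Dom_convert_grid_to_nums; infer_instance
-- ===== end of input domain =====

-- B replaces A's shift/OR accumulator loop with a map to binary digit strings parsed by int(bits, 2) (idiomatic; same cost; return value only).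


-- ===== PORT A =====
-- the module constant SYMBOLS = {".": 0, "#": 1}
def pySYMBOLS : PySem.Dict String Int := PySem.Dict.ofList [(".", 0), ("#", 1)]

-- 'SYMBOLS[symbol]' raises KeyError on chars other than '.'/'#'; those inputs are excluded by
-- Pre_ below, so the lookup is ported with default 0 (never taken inside Pre_).
-- '(row_num << 1) | SYMBOLS[symbol]' is ported as 'row_num * 2 + v': exact, since row_num stays
-- ≥ 0 and v ∈ {0, 1}, so the OR-ed bit position of the shifted value is 0.
def convert_grid_to_nums (grid : List String) : List Int :=
  grid.foldl
    (fun result row =>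
      result ++ [row.toList.foldl
        (fun row_num symbol => row_num * 2 + pySYMBOLS.getD (String.mk [symbol]) 0) 0])
    []

-- ===== PORT B =====
-- hand port of int(bits, 2): exact on strings consisting solely of the digits '0'/'1',
-- which is all B ever feeds it (bits is built from str(SYMBOLS[c]) ∈ {"0", "1"}).
def pyIntBase2 (s : String) : Int :=
  s.toList.foldl (fun acc c => acc * 2 + (Int.ofNat c.toNat - 48)) 0

def convert_grid_to_nums_alt (grid : List String) : List Int :=
  grid.map (fun row =>
    let bits := PySem.Str.join "" (row.toList.map (fun c =>
      PySem.Int.toStr (pySYMBOLS.getD (String.mk [c]) 0)))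
    -- 'if bits else 0' — Python string truthiness is non-emptiness
    if bits.toList = [] then 0 else pyIntBase2 bits)

-- ===== PRECONDITION & SPEC =====
-- Pre_ excludes exactly the inputs on which A raises KeyError: a row containing a character
-- other than '.' or '#'.
def Pre_convert_grid_to_nums (grid : List String) : Prop :=
  (grid.all (fun row => row.toList.all (fun c => c == '.' || c == '#'))) = true
instance (grid : List String) : Decidable (Pre_convert_grid_to_nums grid) := by
  unfold Pre_convert_grid_to_nums; infer_instance
def pvWitness_convert_grid_to_nums : List String := ["#.#", "....", "", "#"]

def Spec_convert_grid_to_nums (grid : List String) (out : List Int) : Prop := out = convert_grid_to_nums_alt grid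
instance (grid : List String) (out : List Int) : Decidable (Spec_convert_grid_to_nums grid out) := by unfold Spec_convert_grid_to_nums; infer_instance

-- ===== CLAIM (what is proved, stated in full; the proofs are below) =====
def Claim_equal_convert_grid_to_nums : Prop := ∀ (grid : List String), Dom_convert_grid_to_nums grid → Pre_convert_grid_to_nums grid → Spec_convert_grid_to_nums grid (convert_grid_to_nums grid)

-- ===== LEMMAS AND PROOFS =====

-- per-character digit: for an admitted char, the joined digit string contributes exactly ['0'] or ['1']
theorem pv_digit_toList (c : Char) (h : c = '.' ∨ c = '#') :
    (PySem.Int.toStr (pySYMBOLS.getD (String.mk [c]) 0)).toList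
      = [if c = '#' then '1' else '0'] := by
  rcases h with h | h <;> subst h <;> decide

-- the two per-row folds agree on rows of '.'/'#'
theorem pv_row_fold (cs : List Char) (h : ∀ c ∈ cs, c = '.' ∨ c = '#') (acc : Int) :
    (cs.map (fun c => if c = '#' then '1' else '0')).foldl
        (fun acc c => acc * 2 + (Int.ofNat c.toNat - 48)) acc
      = cs.foldl (fun row_num symbol => row_num * 2 + pySYMBOLS.getD (String.mk [symbol]) 0) acc := by
  induction cs generalizing acc with
  | nil => rfl
  | cons c cs ih =>
    have hc := h c (List.mem_cons_self ..)
    have hrest : ∀ x ∈ cs, x = '.' ∨ x = '#' := fun x hx => h x (List.mem_cons_of_mem _ hx)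
    simp only [List.map_cons, List.foldl_cons]
    rw [ih hrest]
    rcases hc with hc | hc <;> subst hc
    · have hx : Int.ofNat (if ('.' : Char) = '#' then '1' else '0').toNat - 48
          = pySYMBOLS.getD (String.mk ['.']) 0 := by decide
      rw [hx]
    · have hx : Int.ofNat (if ('#' : Char) = '#' then '1' else '0').toNat - 48
          = pySYMBOLS.getD (String.mk ['#']) 0 := by decide
      rw [hx]

-- the joined bits string, as a char list
theorem pv_bits_toList (cs : List Char) (h : ∀ c ∈ cs, c = '.' ∨ c = '#') :
    (PySem.Str.join "" (cs.map (fun c =>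
        PySem.Int.toStr (pySYMBOLS.getD (String.mk [c]) 0)))).toList
      = cs.map (fun c => if c = '#' then '1' else '0') := by
  rw [PySem.Str.toList_join]
  have : (cs.map (fun c => PySem.Int.toStr (pySYMBOLS.getD (String.mk [c]) 0))).map String.toList
      = (cs.map (fun c => if c = '#' then '1' else '0')).map ([·]) := by
    simp only [List.map_map, List.map_inj_left]
    intro c hc
    exact pv_digit_toList c (h c hc)
  simp only [this]
  exact PySem.Chars.join_nil_singletons _

-- per-row agreement
theorem pv_row_eq (row : String) (h : ∀ c ∈ row.toList, c = '.' ∨ c = '#') :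
    (let bits := PySem.Str.join "" (row.toList.map (fun c =>
        PySem.Int.toStr (pySYMBOLS.getD (String.mk [c]) 0)))
     if bits.toList = [] then 0 else pyIntBase2 bits)
      = row.toList.foldl (fun row_num symbol => row_num * 2 + pySYMBOLS.getD (String.mk [symbol]) 0) 0 := by
  simp only [pyIntBase2, pv_bits_toList row.toList h]
  by_cases he : row.toList = []
  · simp [he]
  · rw [if_neg (by simpa using he), pv_row_fold row.toList h 0]

theorem pv_foldl_append (grid : List String) (f : String → Int) (init : List Int) :
    grid.foldl (fun result row => result ++ [f row]) init = init ++ grid.map f := by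
  induction grid generalizing init with
  | nil => simp
  | cons r rest ih => simp [ih]

-- ===== VERDICT (by name: the statement is the Claim_ definition above) =====
theorem convert_grid_to_nums_spec : Claim_equal_convert_grid_to_nums := by
  intro grid _ hpre
  unfold Spec_convert_grid_to_nums convert_grid_to_nums convert_grid_to_nums_alt
  rw [pv_foldl_append, List.nil_append]
  apply List.map_congr_left
  intro row hrow
  have hr : ∀ c ∈ row.toList, c = '.' ∨ c = '#' := by
    have := (List.all_eq_true.mp hpre) row hrow
    intro c hc
    have := (List.all_eq_true.mp this) c hc
    simpa using this
  exact (pv_row_eq row hr).symm
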